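-- pv_equiv track=rewrite | github.com/RaghavendraGaleppa/FourNodeDistributedArchitecture | server.py | custom_encode
-- ===== SOURCE A (Python) =====
-- def custom_encode(string_par):
-- 	if len(string_par) < 12:
-- 		string_par = string_par + ''.join([str(i) for i in range(12-len(string_par))])
-- 	x = [i for i in range(12)]
-- 	for i in range(len(string_par)):
-- 		x[i % len(x)] = x[i % len(x)] * ord(string_par[i])
-- 		x[i % len(x)] = 65 + x[i % len(x)] % 25
--
-- 	new_x = ''.join([chr(k) for k in x])
-- 	return f"payload_{new_x}"
-- ===== SOURCE B (Python) =====
-- def custom_encode(string_par):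
--     s = string_par
--     if len(s) < 12:
--         s = s + ''.join(str(i) for i in range(12 - len(s)))
--     out = []
--     for j in range(12):
--         v = j
--         p = j
--         while p < len(s):
--             v = 65 + (v * ord(s[p])) % 25
--             p += 12
--         out.append(chr(v))
--     return "payload_" + ''.join(out)
-- ===== Notes on version B (the rewrite author's own statement) =====
-- stated objective: alternative
-- what changed: Replaced the single flat pass that mutates a 12-slot list at index i % 12 with an independent per-slot fold: each output slot j starts at j and folds 65 + (v*ord(c)) % 25 over the characters at positions j, j+12, j+24, ... of the padded string, so no mutable bucket array exists at all.
import Mathlib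
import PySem

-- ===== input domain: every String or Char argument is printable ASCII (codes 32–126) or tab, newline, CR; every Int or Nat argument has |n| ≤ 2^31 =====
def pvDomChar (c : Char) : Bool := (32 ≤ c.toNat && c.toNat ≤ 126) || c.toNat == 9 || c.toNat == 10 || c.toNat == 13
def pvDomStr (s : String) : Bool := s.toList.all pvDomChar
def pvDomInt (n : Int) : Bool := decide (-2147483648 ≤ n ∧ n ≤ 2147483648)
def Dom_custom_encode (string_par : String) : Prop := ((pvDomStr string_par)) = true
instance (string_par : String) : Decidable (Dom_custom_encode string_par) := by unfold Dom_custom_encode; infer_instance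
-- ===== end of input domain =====

-- B replaces A's flat pass over a mutable 12-slot list with an independent fold per output slot
-- (alternative decomposition, same cost).

-- shared padding step (identical Python lines in both sources):
-- if len(s) < 12: s = s + ''.join(str(i) for i in range(12 - len(s)))
def pvPad (s : List Char) : List Char :=
  if s.length < 12 then
    s ++ (((PySem.List.pyRange 0 (12 - (s.length : Int)) 1).map (fun i => PySem.Int.toChars i)).flatten)
  else s

-- ===== PORT A =====
-- x[i % len(x)] = x[i % len(x)] * ord(c); x[i % len(x)] = 65 + x[i % len(x)] % 25
def pvStep (x : List Int) (idx : Nat) (c : Char) : List Int :=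
  let x1 := x.set idx (x.getD idx 0 * (c.toNat : Int))
  x1.set idx (65 + PySem.Int.mod (x1.getD idx 0) 25)

-- for i in range(len(s)): body using s[i]  (structural recursion over the chars with counter i)
def pvLoopA (i : Nat) (t : List Char) (x : List Int) : List Int :=
  match t with
  | [] => x
  | c :: cs => pvLoopA (i + 1) cs (pvStep x (i % x.length) c)

def custom_encode (string_par : String) : String :=
  let s := pvPad string_par.toList
  let x := pvLoopA 0 s (PySem.List.pyRange 0 12 1)
  String.ofList ("payload_".toList ++ x.map (fun k => Char.ofNat k.toNat))

-- ===== PORT B =====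
-- v = j; p = j; while p < len(s): v = 65 + (v * ord(s[p])) % 25; p += 12
def pvBucket (s : List Char) (v : Int) (p : Nat) : Int :=
  if h : p < s.length then
    pvBucket s (65 + PySem.Int.mod (v * ((s[p]).toNat : Int)) 25) (p + 12)
  else v
termination_by s.length - p

def custom_encode_alt (string_par : String) : String :=
  let s := pvPad string_par.toList
  let out := (PySem.List.pyRange 0 12 1).map
    (fun j => Char.ofNat (pvBucket s j j.toNat).toNat)
  String.ofList ("payload_".toList ++ out)

-- ===== PRECONDITION & SPEC =====
def Spec_custom_encode (string_par : String) (out : String) : Prop := out = custom_encode_alt string_par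
instance (string_par : String) (out : String) : Decidable (Spec_custom_encode string_par out) := by unfold Spec_custom_encode; infer_instance

-- ===== CLAIM (what is proved, stated in full; the proofs are below) =====
def Claim_equal_custom_encode : Prop := ∀ (string_par : String), Dom_custom_encode string_par → Spec_custom_encode string_par (custom_encode string_par)

-- ===== LEMMAS AND PROOFS =====

-- proof helper: the same per-slot fold expressed on the suffix list (head, then drop 11 of the rest)
def pvBucketDrop (v : Int) (t : List Char) : Int :=
  match t with
  | [] => v
  | c :: rest => pvBucketDrop (65 + PySem.Int.mod (v * (c.toNat : Int)) 25) (rest.drop 11)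
termination_by t.length
decreasing_by simp

lemma pvBucket_eq_drop (s : List Char) (v : Int) (p : Nat) :
    pvBucket s v p = pvBucketDrop v (s.drop p) := by
  rw [pvBucket]
  split
  · next h =>
    rw [List.drop_eq_getElem_cons h]
    conv_rhs => rw [pvBucketDrop]
    rw [List.drop_drop, pvBucket_eq_drop]
  · next h =>
    rw [List.drop_eq_nil_of_le (by omega), pvBucketDrop]
termination_by s.length - p

lemma length_pvStep (x : List Int) (idx : Nat) (c : Char) :
    (pvStep x idx c).length = x.length := by
  simp [pvStep]

lemma getD_pvStep_self (x : List Int) (idx : Nat) (c : Char) (h : idx < x.length) :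
    (pvStep x idx c).getD idx 0 = 65 + PySem.Int.mod (x.getD idx 0 * (c.toNat : Int)) 25 := by
  simp [pvStep, List.getD, h]

lemma getD_pvStep_ne (x : List Int) (idx j : Nat) (c : Char) (h : j ≠ idx) :
    (pvStep x idx c).getD j 0 = x.getD j 0 := by
  simp [pvStep, List.getD, List.getElem?_set_ne (by omega : idx ≠ j)]

lemma pvLoopA_getD (t : List Char) : ∀ (x : List Int) (i j : Nat), x.length = 12 → j < 12 →
    (pvLoopA i t x).getD j 0 = pvBucketDrop (x.getD j 0) (t.drop ((j + 12 - i % 12) % 12)) := by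
  induction t with
  | nil =>
    intro x i j hx hj
    simp only [pvLoopA, List.drop_nil]
    rw [pvBucketDrop]
  | cons c cs ih =>
    intro x i j hx hj
    have hi : i % x.length = i % 12 := by rw [hx]
    have hx' : (pvStep x (i % 12) c).length = 12 := by rw [length_pvStep, hx]
    rw [pvLoopA, hi, ih _ (i + 1) j hx' hj]
    by_cases h : j = i % 12
    · have hd0 : (j + 12 - i % 12) % 12 = 0 := by omega
      have hd1 : (j + 12 - (i + 1) % 12) % 12 = 11 := by omega
      rw [hd0, hd1, List.drop_zero, h, getD_pvStep_self _ _ _ (by omega)]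
      conv_rhs => rw [pvBucketDrop]
    · have hb : i % 12 < 12 := by omega
      have hd : (j + 12 - i % 12) % 12 = (j + 12 - (i + 1) % 12) % 12 + 1 := by omega
      rw [getD_pvStep_ne _ _ _ _ h, hd, List.drop_succ_cons]

lemma pvLoopA_length (t : List Char) : ∀ (x : List Int) (i : Nat),
    (pvLoopA i t x).length = x.length := by
  induction t with
  | nil => intro x i; rfl
  | cons c cs ih => intro x i; rw [pvLoopA, ih, length_pvStep]

lemma pvLoopA_map_eq (s : List Char) :
    (pvLoopA 0 s (PySem.List.pyRange 0 12 1)).map (fun k => Char.ofNat k.toNat)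
      = (PySem.List.pyRange 0 12 1).map (fun j => Char.ofNat (pvBucket s j j.toNat).toNat) := by
  have hx0 : (PySem.List.pyRange 0 12 1 : List Int).length = 12 := by decide
  have hL : (pvLoopA 0 s (PySem.List.pyRange 0 12 1)).length = 12 := by
    rw [pvLoopA_length, hx0]
  apply List.ext_getElem
  · simp [hL, hx0]
  · intro j h1 h2
    have hj : j < 12 := by simpa [hL] using h1
    simp only [List.getElem_map]
    have hget : (pvLoopA 0 s (PySem.List.pyRange 0 12 1))[j] =
        (pvLoopA 0 s (PySem.List.pyRange 0 12 1)).getD j 0 := by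
      rw [List.getD_eq_getElem _ _ (by omega)]
    rw [hget, pvLoopA_getD s _ 0 j hx0 hj]
    have hr : ((PySem.List.pyRange 0 12 1 : List Int))[j]'(by omega) = (j : Int) := by
      rw [PySem.List.getElem_pyRange_one]; omega
    have hx0j : (PySem.List.pyRange 0 12 1 : List Int).getD j 0 = (j : Int) := by
      rw [List.getD_eq_getElem _ _ (by omega), hr]
    rw [hx0j, hr]
    have : (j + 12 - 0 % 12) % 12 = j := by omega
    rw [this, pvBucket_eq_drop]
    simp

theorem custom_encode_spec : Claim_equal_custom_encode := by
  intro s _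
  unfold Spec_custom_encode custom_encode custom_encode_alt
  simp only []
  rw [pvLoopA_map_eq]
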